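-- pv_equiv track=rewrite | github.com/Kskullknight/OCR | test 2.py | find_first_special_char_index
-- ===== SOURCE A (Python) =====
-- def find_first_special_char_index(address):
--     special_chars = [',', '(', '.']
--     first_char_index = -1
--     for char in special_chars:
--         char_index = address.find(char)
--         if char_index != -1 and (first_char_index == -1 or char_index < first_char_index):
--             first_char_index = char_index
--     return first_char_index
-- ===== SOURCE B (Python) =====
-- def find_first_special_char_index(address):
--     specials = {',', '(', '.'}
--     for i, ch in enumerate(address):
--         if ch in specials:
--             return i
--     return -1
-- ===== Notes on version B (the rewrite author's own statement) =====
-- stated objective: idiomatic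
-- what changed: Replaces three independent str.find scans (one per special char) combined by a running minimum with a single enumerate pass over the string that returns at the first special character.
import Mathlib
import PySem

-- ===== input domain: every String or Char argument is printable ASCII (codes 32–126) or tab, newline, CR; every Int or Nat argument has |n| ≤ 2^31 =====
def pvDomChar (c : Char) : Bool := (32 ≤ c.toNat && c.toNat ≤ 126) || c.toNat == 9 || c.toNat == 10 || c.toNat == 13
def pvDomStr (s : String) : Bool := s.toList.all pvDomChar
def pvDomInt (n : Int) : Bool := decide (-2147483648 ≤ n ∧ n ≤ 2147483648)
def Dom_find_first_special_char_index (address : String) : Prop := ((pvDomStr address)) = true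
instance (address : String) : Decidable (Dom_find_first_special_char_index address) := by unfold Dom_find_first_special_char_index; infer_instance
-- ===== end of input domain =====

-- B replaces three independent str.find scans with a single left-to-right pass (idiomatic).


-- ===== PORT A =====
def find_first_special_char_index (address : String) : Int :=
  let special_chars : List String := [",", "(", "."]
  special_chars.foldl (fun first_char_index char =>
    let char_index := PySem.Str.find address char
    if char_index ≠ -1 ∧ (first_char_index = -1 ∨ char_index < first_char_index)
    then char_index else first_char_index) (-1)

-- ===== PORT B =====
-- the single pass of Source B: walk the enumerated characters, return at the first special one
def pvAltGo : List (Int × Char) → Int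
  | [] => -1
  | (i, ch) :: rest => if ch = ',' ∨ ch = '(' ∨ ch = '.' then i else pvAltGo rest

def find_first_special_char_index_alt (address : String) : Int :=
  pvAltGo (PySem.List.enumerate address.toList)

-- ===== PRECONDITION & SPEC =====
def Spec_find_first_special_char_index (address : String) (out : Int) : Prop := out = find_first_special_char_index_alt address
instance (address : String) (out : Int) : Decidable (Spec_find_first_special_char_index address out) := by unfold Spec_find_first_special_char_index; infer_instance

-- ===== CLAIM (what is proved, stated in full; the proofs are below) =====
def Claim_equal_find_first_special_char_index : Prop := ∀ (address : String), Dom_find_first_special_char_index address → Spec_find_first_special_char_index address (find_first_special_char_index address)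

-- ===== LEMMAS AND PROOFS =====

def pvSpec (c : Char) : Prop := c = ',' ∨ c = '(' ∨ c = '.'

-- a singleton list is a prefix iff it is the head
theorem pv_singleton_prefix {c : Char} {l : List Char} : [c] <+: l ↔ l.head? = some c := by
  cases l with
  | nil => simp
  | cons a t => simp [List.cons_prefix_cons, eq_comm]

-- a singleton list is infix iff membership
theorem pv_singleton_infix {c : Char} {l : List Char} : [c] <:+: l ↔ c ∈ l := by
  constructor
  · rintro ⟨s, t, h⟩
    subst h; simp
  · intro h
    obtain ⟨s, t, h⟩ := List.append_of_mem h
    exact ⟨s, t, by simp [h]⟩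

-- B characterization: either no special char, result -1; or a first-special decomposition
theorem pvAltGo_char (cs : List Char) (i : Int) :
    ((∀ c ∈ cs, ¬ pvSpec c) ∧ pvAltGo (PySem.List.enumerate cs i) = -1) ∨
    (∃ l₁ c l₂, cs = l₁ ++ c :: l₂ ∧ pvSpec c ∧ (∀ d ∈ l₁, ¬ pvSpec d) ∧
      pvAltGo (PySem.List.enumerate cs i) = i + l₁.length) := by
  induction cs generalizing i with
  | nil => left; simp [PySem.List.enumerate_nil, pvAltGo]
  | cons a t ih =>
    by_cases ha : pvSpec a
    · right
      refine ⟨[], a, t, rfl, ha, by simp, ?_⟩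
      simp [PySem.List.enumerate_cons, pvAltGo, pvSpec] at ha ⊢
      rcases ha with h | h | h <;> simp [h]
    · have hstep : pvAltGo (PySem.List.enumerate (a :: t) i) = pvAltGo (PySem.List.enumerate t (i + 1)) := by
        have : ¬ (a = ',' ∨ a = '(' ∨ a = '.') := ha
        simp [PySem.List.enumerate_cons, pvAltGo, this]
      rcases ih (i + 1) with ⟨hnone, heq⟩ | ⟨l₁, c, l₂, hdec, hc, hl₁, heq⟩
      · left
        refine ⟨?_, by rw [hstep]; exact heq⟩
        intro x hx; rcases List.mem_cons.mp hx with hx | hx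
        · exact hx ▸ ha
        · exact hnone x hx
      · right
        refine ⟨a :: l₁, c, l₂, by simp [hdec], hc, ?_, ?_⟩
        · intro d hd; rcases List.mem_cons.mp hd with hd | hd
          · exact hd ▸ ha
          · exact hl₁ d hd
        · rw [hstep, heq]; simp; ring

-- find of a special char that is absent
theorem pv_find_absent {c : Char} {cs : List Char} (h : c ∉ cs) :
    PySem.Chars.find cs [c] = -1 := by
  rw [PySem.Chars.find_eq_neg_one_iff, pv_singleton_infix]; exact h

-- in the first-special decomposition, find of the special char c equals l₁.length
theorem pv_find_at (l₁ l₂ : List Char) (c : Char) (hl₁ : ∀ d ∈ l₁, ¬ pvSpec d) (hc : pvSpec c) :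
    PySem.Chars.find (l₁ ++ c :: l₂) [c] = (l₁.length : Int) := by
  set cs := l₁ ++ c :: l₂ with hcs
  have hpref : [c] <+: cs.drop l₁.length := by
    rw [hcs, List.drop_left]; exact ⟨l₂, rfl⟩
  have hne : PySem.Chars.find cs [c] ≠ -1 := by
    rw [PySem.Chars.find_ne_neg_one_iff, pv_singleton_infix, hcs]
    simp
  have hnonneg : 0 ≤ PySem.Chars.find cs [c] := by
    have := PySem.Chars.neg_one_le_find (s := cs) (sub := [c])
    omega
  obtain ⟨hp, hmin⟩ := PySem.Chars.find_spec (s := cs) (sub := [c]) hnonneg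
  set m := (PySem.Chars.find cs [c]).toNat with hm
  have hle : m ≤ l₁.length := by
    by_contra hlt
    exact hmin l₁.length (by omega) hpref
  have hmeq : m = l₁.length := by
    rcases Nat.lt_or_ge m l₁.length with hlt | hge
    · exfalso
      rw [pv_singleton_prefix] at hp
      have hhead : (cs.drop m).head? = l₁[m]? := by
        rw [hcs, List.drop_append_of_le_length (by omega), ← List.head?_drop]
        cases hdm : l₁.drop m with
        | nil => exfalso; have := List.drop_eq_nil_iff.mp hdm; omega
        | cons x xs => simp
      rw [hhead] at hp
      exact hl₁ c (List.mem_of_getElem? hp) hc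
    · omega
  omega

-- any nonnegative find of a special char is ≥ l₁.length in the decomposition
theorem pv_find_ge (l₁ l₂ : List Char) (c c' : Char) (hl₁ : ∀ d ∈ l₁, ¬ pvSpec d)
    (hc' : pvSpec c') (hnn : 0 ≤ PySem.Chars.find (l₁ ++ c :: l₂) [c']) :
    (l₁.length : Int) ≤ PySem.Chars.find (l₁ ++ c :: l₂) [c'] := by
  set cs := l₁ ++ c :: l₂ with hcs
  obtain ⟨hp, _⟩ := PySem.Chars.find_spec (s := cs) (sub := [c']) hnn
  set m := (PySem.Chars.find cs [c']).toNat with hm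
  by_contra hlt
  have hmlt : m < l₁.length := by omega
  rw [pv_singleton_prefix] at hp
  have hhead : (cs.drop m).head? = l₁[m]? := by
    rw [hcs, List.drop_append_of_le_length (by omega), ← List.head?_drop]
    cases hdm : l₁.drop m with
    | nil => exfalso; have := List.drop_eq_nil_iff.mp hdm; omega
    | cons x xs => simp
  rw [hhead] at hp
  exact hl₁ c' (List.mem_of_getElem? hp) hc'

-- the arithmetic shape of A's fold on three values, when each is -1 or ≥ k and one equals k
theorem pv_min3 (f g h k : Int) (hk : 0 ≤ k)
    (hf : f = -1 ∨ k ≤ f) (hg : g = -1 ∨ k ≤ g) (hh : h = -1 ∨ k ≤ h)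
    (hone : f = k ∨ g = k ∨ h = k) :
    (if h ≠ -1 ∧ ((if g ≠ -1 ∧ ((if f ≠ -1 ∧ ((-1 : Int) = -1 ∨ f < -1) then f else -1) = -1 ∨
        g < (if f ≠ -1 ∧ ((-1 : Int) = -1 ∨ f < -1) then f else -1)) then g
        else (if f ≠ -1 ∧ ((-1 : Int) = -1 ∨ f < -1) then f else -1)) = -1 ∨
        h < (if g ≠ -1 ∧ ((if f ≠ -1 ∧ ((-1 : Int) = -1 ∨ f < -1) then f else -1) = -1 ∨
        g < (if f ≠ -1 ∧ ((-1 : Int) = -1 ∨ f < -1) then f else -1)) then g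
        else (if f ≠ -1 ∧ ((-1 : Int) = -1 ∨ f < -1) then f else -1))) then h
        else (if g ≠ -1 ∧ ((if f ≠ -1 ∧ ((-1 : Int) = -1 ∨ f < -1) then f else -1) = -1 ∨
        g < (if f ≠ -1 ∧ ((-1 : Int) = -1 ∨ f < -1) then f else -1)) then g
        else (if f ≠ -1 ∧ ((-1 : Int) = -1 ∨ f < -1) then f else -1))) = k := by
  split_ifs <;> omega

-- ===== VERDICT (by name: the statement is the Claim_ definition above) =====
theorem find_first_special_char_index_spec : Claim_equal_find_first_special_char_index := by
  intro address _
  unfold Spec_find_first_special_char_index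
  unfold find_first_special_char_index find_first_special_char_index_alt
  rcases pvAltGo_char address.toList 0 with ⟨hnone, heq⟩ | ⟨l₁, c, l₂, hdec, hc, hl₁, heq⟩
  · rw [heq]
    have h1 : PySem.Chars.find address.toList [','] = -1 :=
      pv_find_absent (fun hm => hnone _ hm (Or.inl rfl))
    have h2 : PySem.Chars.find address.toList ['('] = -1 :=
      pv_find_absent (fun hm => hnone _ hm (Or.inr (Or.inl rfl)))
    have h3 : PySem.Chars.find address.toList ['.'] = -1 :=
      pv_find_absent (fun hm => hnone _ hm (Or.inr (Or.inr rfl)))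
    simp [List.foldl, PySem.Str.find_eq, h1, h2, h3]
  · rw [heq]
    have key : ∀ c' : Char, pvSpec c' →
        (PySem.Chars.find address.toList [c'] = -1 ∨
          (l₁.length : Int) ≤ PySem.Chars.find address.toList [c']) := by
      intro c' hc'
      by_cases hnn : 0 ≤ PySem.Chars.find address.toList [c']
      · right; rw [hdec] at hnn ⊢; exact pv_find_ge l₁ l₂ c c' hl₁ hc' hnn
      · left
        have := PySem.Chars.neg_one_le_find (s := address.toList) (sub := [c'])
        omega
    have hat : PySem.Chars.find address.toList [c] = (l₁.length : Int) := by
      rw [hdec]; exact pv_find_at l₁ l₂ c hl₁ hc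
    have hone : PySem.Chars.find address.toList [','] = (l₁.length : Int) ∨
        PySem.Chars.find address.toList ['('] = (l₁.length : Int) ∨
        PySem.Chars.find address.toList ['.'] = (l₁.length : Int) := by
      rcases hc with h | h | h
      · left; rw [← h]; exact hat
      · right; left; rw [← h]; exact hat
      · right; right; rw [← h]; exact hat
    simp only [List.foldl, PySem.Str.find_eq]
    have := pv_min3 (PySem.Chars.find address.toList [','])
      (PySem.Chars.find address.toList ['('])
      (PySem.Chars.find address.toList ['.'])
      (l₁.length : Int) (by positivity)
      (key _ (Or.inl rfl)) (key _ (Or.inr (Or.inl rfl))) (key _ (Or.inr (Or.inr rfl))) hone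
    convert this using 2 <;> simp
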